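-- pv_equiv track=rewrite | github.com/BrianCLong/summit | services/tpfr/fingerprint.py | iter_records_from_mapping
-- ===== SOURCE A (Python) =====
-- from typing import Any, Dict, Iterable, Iterator, List, Mapping, Optional, Sequence, Tuple
--
-- def iter_records_from_mapping(table: Mapping[str, Sequence[Any]]) -> Iterator[Mapping[str, Any]]:
--     columns = list(table.keys())
--     lengths = [len(table[column]) for column in columns]
--     length = max(lengths, default=0)
--     for index in range(length):
--         yield {
--             column: table[column][index] if index < len(table[column]) else None for column in columns
--         }
-- ===== SOURCE B (Python) =====
-- _MISSING = object()
--
--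
-- def iter_records_from_mapping(table):
--     columns = list(table.keys())
--     iterators = [iter(table[column]) for column in columns]
--     while True:
--         record = {}
--         exhausted = True
--         for column, iterator in zip(columns, iterators):
--             value = next(iterator, _MISSING)
--             if value is _MISSING:
--                 record[column] = None
--             else:
--                 exhausted = False
--                 record[column] = value
--         if exhausted:
--             return
--         yield record
-- ===== Notes on version B (the rewrite author's own statement) =====
-- stated objective: alternative
-- what changed: Replaces the precomputed max-length and range-index loop with per-element bounds checks by draining parallel iterators zip_longest-style, padding exhausted columns with None until all iterators are exhausted.
import Mathlib
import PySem

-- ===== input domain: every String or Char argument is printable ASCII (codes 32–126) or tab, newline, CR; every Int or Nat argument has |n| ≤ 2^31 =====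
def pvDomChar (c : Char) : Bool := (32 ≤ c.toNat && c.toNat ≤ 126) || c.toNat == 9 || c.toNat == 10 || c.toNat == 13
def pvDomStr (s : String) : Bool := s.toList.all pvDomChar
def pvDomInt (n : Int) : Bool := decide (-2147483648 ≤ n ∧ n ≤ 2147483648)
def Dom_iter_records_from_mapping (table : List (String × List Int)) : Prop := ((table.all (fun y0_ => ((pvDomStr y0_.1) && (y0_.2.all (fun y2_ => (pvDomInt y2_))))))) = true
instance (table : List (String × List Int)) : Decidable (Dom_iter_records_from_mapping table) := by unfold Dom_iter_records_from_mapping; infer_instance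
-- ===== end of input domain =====

-- B changes the algorithm: instead of computing max length and indexing with bounds checks,
-- it drains parallel iterators (heads/tails), padding exhausted columns with None. Return value only.

-- ===== PORT A =====
def iter_records_from_mapping (table : List (String × List Int)) : List (List (String × Option Int)) :=
  let lengths : List Int := table.map (fun p => (p.2.length : Int))
  let length : Int := (PySem.List.max? lengths (fun x => x)).getD 0
  (PySem.List.pyRange 0 length 1).map (fun i =>
    table.map (fun p => (p.1, if i < (p.2.length : Int) then PySem.List.pyGet? p.2 i else none)))

-- ===== PORT B =====
-- termination measure lemmas for pvRows (cited in decreasing_by)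
theorem pvRows_measure_le (t : List (String × List Int)) :
    (t.map (fun p => p.2.tail.length)).sum ≤ (t.map (fun p => p.2.length)).sum := by
  induction t with
  | nil => simp
  | cons q u ih =>
    simp only [List.map_cons, List.sum_cons]
    have : q.2.tail.length = q.2.length - 1 := List.length_tail ..
    omega

theorem pvRows_measure (table : List (String × List Int))
    (h : table.any (fun p => !p.2.isEmpty) = true) :
    (table.map (fun p => p.2.tail.length)).sum < (table.map (fun p => p.2.length)).sum := by
  induction table with
  | nil => simp at h
  | cons p t ih =>
    simp only [List.any_cons, Bool.or_eq_true] at h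
    have hle := pvRows_measure_le t
    have htl : p.2.tail.length = p.2.length - 1 := List.length_tail ..
    simp only [List.map_cons, List.sum_cons]
    rcases h with h | h
    · have : p.2.length ≠ 0 := by
        obtain ⟨c, xs⟩ := p; cases xs <;> simp_all
      omega
    · have := ih h
      omega

-- while loop of B: build a row of (column, head of its remaining values); stop when all exhausted
def pvRows (table : List (String × List Int)) : List (List (String × Option Int)) :=
  if h : table.any (fun p => !p.2.isEmpty) = true then
    table.map (fun p => (p.1, p.2.head?)) :: pvRows (table.map (fun p => (p.1, p.2.tail)))
  else []
termination_by (table.map (fun p => p.2.length)).sum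
decreasing_by
  simp only [Function.comp_def, List.map_map]
  conv_lhs => rw [show (fun x : {x // x ∈ table} => x.val.2.tail.length)
        = ((fun p : String × List Int => p.2.tail.length) ∘ Subtype.val) from rfl,
      ← List.map_map, List.attach_map_subtype_val]
  exact pvRows_measure table h

def iter_records_from_mapping_alt (table : List (String × List Int)) : List (List (String × Option Int)) :=
  pvRows table

-- ===== PRECONDITION & SPEC =====
def Spec_iter_records_from_mapping (table : List (String × List Int)) (out : List (List (String × Option Int))) : Prop := out = iter_records_from_mapping_alt table
instance (table : List (String × List Int)) (out : List (List (String × Option Int))) : Decidable (Spec_iter_records_from_mapping table out) := by unfold Spec_iter_records_from_mapping; infer_instance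

-- ===== CLAIM (what is proved, stated in full; the proofs are below) =====
def Claim_equal_iter_records_from_mapping : Prop := ∀ (table : List (String × List Int)), Dom_iter_records_from_mapping table → Spec_iter_records_from_mapping table (iter_records_from_mapping table)

-- ===== LEMMAS AND PROOFS =====

-- max column length, the common yardstick for both proofs
def pvML (table : List (String × List Int)) : Nat :=
  table.foldr (fun p m => max p.2.length m) 0

theorem pvML_tail (table : List (String × List Int)) :
    pvML (table.map (fun p => (p.1, p.2.tail))) = pvML table - 1 := by
  induction table with
  | nil => simp [pvML]
  | cons p t ih =>
    simp only [pvML, List.map_cons, List.foldr_cons, List.length_tail] at *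
    omega

theorem pvML_zero_iff (table : List (String × List Int)) :
    table.any (fun p => !p.2.isEmpty) = false ↔ pvML table = 0 := by
  induction table with
  | nil => simp [pvML]
  | cons p t ih =>
    obtain ⟨c, xs⟩ := p
    cases xs <;> simp_all [pvML]

theorem pvRows_eq (n : Nat) : ∀ (table : List (String × List Int)), pvML table = n →
    pvRows table = (List.range n).map (fun i => table.map (fun p => (p.1, p.2[i]?))) := by
  induction n with
  | zero =>
    intro table h
    rw [pvRows.eq_def]
    simp [(pvML_zero_iff table).mpr h]
  | succ n ih =>
    intro table h
    have hany : table.any (fun p => !p.2.isEmpty) = true := by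
      by_contra hc
      rw [Bool.not_eq_true] at hc
      have := (pvML_zero_iff table).mp hc
      omega
    rw [pvRows.eq_def, dif_pos hany]
    have htl : pvML (table.map (fun p => (p.1, p.2.tail))) = n := by
      rw [pvML_tail]; omega
    rw [ih _ htl, List.range_succ_eq_map]
    simp only [List.map_cons, List.map_map]
    congr 1
    · exact (List.map_congr_left (fun p _ => by rw [List.head?_eq_getElem?]))
    · apply List.map_congr_left
      intro i _
      simp only [Function.comp_def]
      apply List.map_congr_left
      intro p _
      simp [List.getElem?_tail]

theorem pvMaxInt (t : List (String × List Int)) (a : Int) (ha : 0 ≤ a) :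
    (t.map (fun p => (p.2.length : Int))).foldl max a = max a (pvML t : Int) := by
  induction t generalizing a with
  | nil => simp [pvML]; omega
  | cons p t ih =>
    simp only [List.map_cons, List.foldl_cons]
    rw [ih _ (by positivity)]
    have : pvML (p :: t) = max p.2.length (pvML t) := rfl
    rw [this]
    push_cast
    rw [max_assoc]

theorem A_eq (table : List (String × List Int)) :
    iter_records_from_mapping table
      = (List.range (pvML table)).map (fun i => table.map (fun p => (p.1, p.2[i]?))) := by
  have hlen : ((PySem.List.max? (table.map (fun p => (p.2.length : Int))) (fun x => x)).getD 0) = (pvML table : Int) := by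
    cases table with
    | nil => simp [PySem.List.max?, pvML]
    | cons p t =>
      rw [List.map_cons, PySem.List.max?_id_cons]
      rw [Option.getD_some, pvMaxInt t (p.2.length : Int) (by positivity)]
      have : pvML (p :: t) = max p.2.length (pvML t) := rfl
      rw [this]
      push_cast
      rfl
  show (PySem.List.pyRange 0 ((PySem.List.max? (table.map (fun p => (p.2.length : Int))) (fun x => x)).getD 0) 1).map _ = _
  rw [hlen, PySem.List.pyRange_zero_nat]
  rw [List.map_map]
  apply List.map_congr_left
  intro i _
  simp only [Function.comp]
  apply List.map_congr_left
  intro p _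
  by_cases h : i < p.2.length
  · rw [if_pos (by exact_mod_cast h), PySem.List.pyGet?_natCast]
  · rw [if_neg (by exact_mod_cast h), List.getElem?_eq_none (by omega)]

-- ===== VERDICT (by name: the statement is the Claim_ definition above) =====
theorem iter_records_from_mapping_spec : Claim_equal_iter_records_from_mapping := by
  intro table _
  show iter_records_from_mapping table = iter_records_from_mapping_alt table
  rw [A_eq, iter_records_from_mapping_alt, pvRows_eq (pvML table) table rfl]
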